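-- pv_equiv track=rewrite | github.com/dkanzariya/Python | Password.py | count_passwords
-- ===== SOURCE A (Python) =====
-- def count_passwords(m, n):
--     MOD = 10**9 + 7
--
--     # Initialize the total count
--     total_count = 0
--
--     # Iterate through each possible length in the range [m, n]
--     for length in range(m, n + 1):
--         # Count the number of passwords for the current length
--         if length == m:
--             # The first character must be a lowercase letter, and the last character must be a digit
--             # For the characters in between, there are 36 choices (26 lowercase letters + 10 digits)
--             count = 26 * 36**(length - 2) * 10
--         else:
--             # For lengths greater than m, the first character can also be a digit
--             # In this case, there are 37 choices (26 lowercase letters + 10 digits) for the first character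
--             count = 26 * 36**(length - 2) * 10
--
--         # Add the count to the total
--         total_count = (total_count + count) % MOD
--
--     return total_count
-- ===== SOURCE B (Python) =====
-- def count_passwords(m, n):
--     # Closed-form geometric series: sum_{l=m}^{n} 260*36^(l-2)
--     #   = 260 * 36^(m-2) * (36^(n-m+1) - 1) / 35   (mod 10^9+7)
--     MOD = 10**9 + 7
--     if m > n:
--         return 0
--     INV35 = 628571433  # modular inverse of 35 modulo 10^9+7
--     geo = (pow(36, n - m + 1, MOD) - 1) * INV35 % MOD
--     return 260 * pow(36, m - 2, MOD) % MOD * geo % MOD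
-- ===== Notes on version B (the rewrite author's own statement) =====
-- stated objective: alternative
-- what changed: Replaces the per-length loop summing 260*36^(length-2) by the closed-form geometric series evaluated with built-in three-argument pow and a precomputed modular inverse of 35.
-- outside the precondition, e.g. on count_passwords(1, 3): A returns 9627.222222222223, B returns 222231851
import Mathlib
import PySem

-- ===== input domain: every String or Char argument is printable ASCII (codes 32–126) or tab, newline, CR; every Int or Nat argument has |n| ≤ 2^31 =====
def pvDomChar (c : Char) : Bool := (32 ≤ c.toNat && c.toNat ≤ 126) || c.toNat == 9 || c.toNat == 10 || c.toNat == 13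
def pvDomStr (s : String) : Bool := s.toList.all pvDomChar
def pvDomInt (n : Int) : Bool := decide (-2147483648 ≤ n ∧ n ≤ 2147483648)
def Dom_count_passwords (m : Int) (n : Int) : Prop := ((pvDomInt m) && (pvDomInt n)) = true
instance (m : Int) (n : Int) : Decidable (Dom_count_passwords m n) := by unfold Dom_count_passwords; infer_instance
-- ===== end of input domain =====

-- B replaces A's length-by-length loop by the closed-form geometric series with modular
-- exponentiation and a precomputed inverse of 35 (a different algorithm, not a rewrite of the loop).


-- ===== PORT A =====
-- 36**(length-2) is ported with a Nat exponent ((length-2).toNat): exact whenever length ≥ 2,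
-- which Pre_ guarantees for every length the loop visits (Python yields floats below that).
def count_passwords (m : Int) (n : Int) : Int :=
  let MOD : Int := 10 ^ 9 + 7
  (PySem.List.pyRange m (n + 1) 1).foldl
    (fun total_count length =>
      let count : Int :=
        if length == m then 26 * 36 ^ (length - 2).toNat * 10
        else 26 * 36 ^ (length - 2).toNat * 10
      (total_count + count) % MOD) 0

-- ===== PORT B =====
-- pow(36, e, MOD) is the builtin three-argument pow = PySem.Int.powMod (exponents are ≥ 0 under Pre_).
def count_passwords_alt (m : Int) (n : Int) : Int :=
  let MOD : Int := 10 ^ 9 + 7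
  if m > n then 0
  else
    let INV35 : Int := 628571433
    let geo := (PySem.Int.powMod 36 (n - m + 1).toNat MOD - 1) * INV35 % MOD
    260 * PySem.Int.powMod 36 (m - 2).toNat MOD % MOD * geo % MOD

-- ===== PRECONDITION & SPEC =====
-- Pre_ excludes nonempty ranges starting below 2 (m ≤ 1 ∧ m ≤ n): there Python's 36**(length-2)
-- is a float, so A returns a float (or overflows) instead of an int.
def Pre_count_passwords (m : Int) (n : Int) : Prop := n < m ∨ 2 ≤ m
instance (m : Int) (n : Int) : Decidable (Pre_count_passwords m n) := by unfold Pre_count_passwords; infer_instance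
def pvWitness_count_passwords : Int × Int := (2, 5)
def Spec_count_passwords (m : Int) (n : Int) (out : Int) : Prop := out = count_passwords_alt m n
instance (m : Int) (n : Int) (out : Int) : Decidable (Spec_count_passwords m n out) := by unfold Spec_count_passwords; infer_instance

-- ===== CLAIM (what is proved, stated in full; the proofs are below) =====
def Claim_equal_count_passwords : Prop := ∀ (m : Int) (n : Int), Dom_count_passwords m n → Pre_count_passwords m n → Spec_count_passwords m n (count_passwords m n)

-- ===== LEMMAS AND PROOFS =====

-- cast of a reduction mod 10^9+7 into ZMod 1000000007
theorem pvCastMod (a : Int) : ((a % (1000000007 : Int) : Int) : ZMod 1000000007) = (a : ZMod 1000000007) := by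
  have h : ((1000000007 : ℕ) : ℤ) = (1000000007 : Int) := by norm_num
  rw [← h, ZMod.intCast_mod]

theorem pvInv35 : (35 : ZMod 1000000007) * 628571433 = 1 := by decide

-- A's fold result, cast into ZMod 1000000007, in closed form (n = m + j)
theorem pvAForm (m : Int) (hm : 2 ≤ m) (j : ℕ) :
    ((count_passwords m (m + j) : Int) : ZMod 1000000007) =
      260 * 36 ^ (m - 2).toNat * (36 ^ (j + 1) - 1) * 628571433 := by
  have hM : (10 ^ 9 + 7 : Int) = (1000000007 : Int) := by norm_num
  induction j with
  | zero =>
      simp only [count_passwords, Nat.cast_zero, add_zero]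
      rw [PySem.List.pyRange_one_singleton]
      simp only [List.foldl, ite_self, zero_add]
      rw [hM, pvCastMod]
      push_cast
      linear_combination (-(260 * (36 : ZMod 1000000007) ^ (m - 2).toNat)) * pvInv35
  | succ j ih =>
      have hsplit : PySem.List.pyRange m (m + (j + 1 : ℕ) + 1) 1
          = PySem.List.pyRange m (m + j + 1) 1 ++ [m + j + 1] := by
        have := PySem.List.pyRange_one_succ_right (a := m) (b := m + j + 1) (by omega)
        rw [← this]; congr 1; push_cast; ring
      simp only [count_passwords, ite_self] at ih ⊢
      rw [hsplit, List.foldl_append]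
      simp only [List.foldl]
      rw [hM] at ih ⊢
      rw [pvCastMod]
      have he : (m + (j : ℤ) + 1 - 2).toNat = (m - 2).toNat + (j + 1) := by omega
      push_cast [he] at ih ⊢
      rw [ih, pow_add]
      linear_combination (-(260 * (36 : ZMod 1000000007) ^ (m - 2).toNat * 36 ^ (j + 1))) * pvInv35

-- A's result is already reduced mod 10^9+7
theorem pvAReduced (m n : Int) (h : m ≤ n) :
    count_passwords m n % (1000000007 : Int) = count_passwords m n := by
  simp only [count_passwords]
  rw [PySem.List.pyRange_one_succ_right h, List.foldl_append]
  simp only [List.foldl]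
  have : (10 ^ 9 + 7 : Int) = (1000000007 : Int) := by norm_num
  rw [this]
  exact Int.emod_emod_of_dvd _ dvd_rfl

-- B's result, cast into ZMod 1000000007, in the same closed form
theorem pvBForm (m n : Int) (h : ¬ m > n) :
    ((count_passwords_alt m n : Int) : ZMod 1000000007) =
      260 * 36 ^ (m - 2).toNat * (36 ^ (n - m + 1).toNat - 1) * 628571433 := by
  simp only [count_passwords_alt, if_neg h]
  have hM : (10 ^ 9 + 7 : Int) = (1000000007 : Int) := by norm_num
  have hpos : (0 : Int) < 10 ^ 9 + 7 := by norm_num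
  rw [PySem.Int.powMod_eq_emod _ _ hpos, PySem.Int.powMod_eq_emod _ _ hpos, hM]
  simp only [pvCastMod, Int.cast_mul, Int.cast_sub, Int.cast_one, Int.cast_ofNat, Int.cast_pow]
  ring

theorem pvBReduced (m n : Int) (h : ¬ m > n) :
    count_passwords_alt m n % (1000000007 : Int) = count_passwords_alt m n := by
  simp only [count_passwords_alt, if_neg h]
  have : (10 ^ 9 + 7 : Int) = (1000000007 : Int) := by norm_num
  rw [this]
  exact Int.emod_emod_of_dvd _ dvd_rfl

-- ===== VERDICT (by name: the statement is the Claim_ definition above) =====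
theorem count_passwords_spec : Claim_equal_count_passwords := by
  intro m n _ hpre
  unfold Spec_count_passwords
  by_cases hmn : m > n
  · -- empty range: both return 0
    simp only [count_passwords, count_passwords_alt, if_pos hmn]
    rw [PySem.List.pyRange_one_eq_nil (by omega)]
    rfl
  · have hm : 2 ≤ m := by rcases hpre with h | h <;> omega
    have hle : m ≤ n := by omega
    have hj : n = m + ((n - m).toNat : ℤ) := by omega
    have hcast : ((count_passwords m n : Int) : ZMod 1000000007)
        = ((count_passwords_alt m n : Int) : ZMod 1000000007) := by
      rw [pvBForm m n hmn]
      have hk : (n - m + 1).toNat = (n - m).toNat + 1 := by omega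
      rw [hk]
      conv_lhs => rw [hj]
      exact pvAForm m hm (n - m).toNat
    have := (ZMod.intCast_eq_intCast_iff' _ _ _).mp hcast
    have hN : ((1000000007 : ℕ) : ℤ) = (1000000007 : Int) := by norm_num
    rw [hN, pvAReduced m n hle, pvBReduced m n hmn] at this
    exact this
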